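-- pv_equiv track=rewrite | github.com/tengr/Algorithms | qq.py | set_chars
-- ===== SOURCE A (Python) =====
-- from itertools import permutations, combinations, combinations_with_replacement
--
-- def set_chars(char_map):
--     res_list = []
--     for permutation in permutations(num_str, len(char_map)):
--         arr = [''] * 8
--         for ch, key in zip(permutation, char_map):
--             idx_list = char_map[key]
--             for idx in idx_list:
--                 arr[idx] = ch
--         res_list.append(arr)
--     return res_list
--
-- num_str = '0123456789'
-- ===== SOURCE B (Python) =====
-- num_str = '0123456789'
--
-- def set_chars(char_map):
--     # Recursive backtracking over the keys: assign each key an unused digit in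
--     # order, building each array incrementally; no permutation tuple is ever built.
--     entries = list(char_map.items())
--     if len(entries) > len(num_str):
--         return []  # more keys than digits: no full assignment exists
--     res = []
--
--     def go(k, digits, arr):
--         if k == len(entries):
--             res.append(arr)
--             return
--         idx_list = entries[k][1]
--         for j in range(len(digits)):
--             ch = digits[j]
--             arr2 = arr[:]
--             for idx in idx_list:
--                 arr2[idx] = ch
--             go(k + 1, digits[:j] + digits[j + 1:], arr2)
--
--     go(0, list(num_str), [''] * 8)
--     return res
-- ===== Notes on version B (the rewrite author's own statement) =====
-- stated objective: alternative
-- what changed: B replaces A's loop over itertools.permutations plus per-permutation key/index fill with recursive backtracking over the keys: each key is assigned an unused digit in order and the output array is built incrementally down the recursion, so no permutation tuple is ever materialised and there is no dict lookup inside the loop.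
import Mathlib
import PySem

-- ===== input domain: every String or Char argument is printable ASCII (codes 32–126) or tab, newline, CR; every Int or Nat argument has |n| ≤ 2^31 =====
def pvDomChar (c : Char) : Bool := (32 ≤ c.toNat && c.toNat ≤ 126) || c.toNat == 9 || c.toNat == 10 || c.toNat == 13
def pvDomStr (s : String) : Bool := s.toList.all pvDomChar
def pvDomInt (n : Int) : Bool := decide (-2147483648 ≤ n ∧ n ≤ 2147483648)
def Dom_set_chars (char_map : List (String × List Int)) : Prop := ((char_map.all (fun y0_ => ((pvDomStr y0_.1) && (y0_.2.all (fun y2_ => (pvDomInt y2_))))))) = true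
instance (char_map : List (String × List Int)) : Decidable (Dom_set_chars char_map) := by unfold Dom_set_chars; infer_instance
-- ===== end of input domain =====

-- B replaces A's itertools.permutations loop + per-permutation key walk with recursive
-- backtracking over the keys, assigning unused digits in order and building each output
-- array incrementally (objective: alternative algorithm; return value only).

-- first-match dict lookup (used by A)
def pvLookup (char_map : List (String × List Int)) (key : String) : List Int :=
  match char_map.find? (fun p => p.1 == key) with
  | some p => p.2
  | none => []

def pvPickOne {α : Type} : List α → List (α × List α)
  | [] => []
  | x :: xs => (x, xs) :: (pvPickOne xs).map (fun p => (p.1, x :: p.2))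

-- itertools.permutations(s, r): choose r elements without repetition, in index-lexicographic order
def pvPerms {α : Type} : Nat → List α → List (List α)
  | 0, _ => [[]]
  | r + 1, s => (pvPickOne s).flatMap (fun p => (pvPerms r p.2).map (fun t => p.1 :: t))

def pvNumStr : List String := ["0", "1", "2", "3", "4", "5", "6", "7", "8", "9"]

-- ===== PORT A =====
def set_chars (char_map : List (String × List Int)) : List (List String) :=
  (pvPerms char_map.length pvNumStr).foldl
    (fun res_list permutation =>
      let arr : List String :=
        (List.zip permutation (char_map.map Prod.fst)).foldl
          (fun arr ck =>
            (pvLookup char_map ck.2).foldl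
              (fun arr idx => PySem.List.pySetD arr idx ck.1) arr)
          (List.replicate 8 "")
      res_list ++ [arr])
    []

-- ===== PORT B =====
-- go(k, digits, arr): recurse over the remaining entries, trying each remaining digit
-- (digits[:j] + digits[j+1:] removes the chosen one); a finished arr is one result row.
def set_chars_go : List (String × List Int) → List String → List String → List (List String)
  | [], _, arr => [arr]
  | e :: es, digits, arr =>
    (List.range digits.length).flatMap (fun j =>
      let ch := digits.getD j ""
      let arr2 := e.2.foldl (fun a idx => PySem.List.pySetD a idx ch) arr
      set_chars_go es (digits.take j ++ digits.drop (j + 1)) arr2)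

def set_chars_alt (char_map : List (String × List Int)) : List (List String) :=
  if pvNumStr.length < char_map.length then []  -- more keys than digits: no full assignment
  else set_chars_go char_map pvNumStr (List.replicate 8 "")

-- ===== PRECONDITION & SPEC =====
-- Pre_ excludes (a) duplicate keys, on which the assoc-list model of a Python dict is
-- ambiguous (dict construction collapses them), and (b) target indices outside -8..7
-- reached by arr[idx], where Python A raises IndexError (unless len(char_map) > 10,
-- when the permutation loop is empty and no index is ever used).
def Pre_set_chars (char_map : List (String × List Int)) : Prop :=
  (char_map.map Prod.fst).Nodup ∧
    (10 < char_map.length ∨ ∀ p ∈ char_map, ∀ idx ∈ p.2, -8 ≤ idx ∧ idx < 8)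
instance (char_map : List (String × List Int)) : Decidable (Pre_set_chars char_map) := by
  unfold Pre_set_chars; infer_instance

def pvWitness_set_chars : (List (String × List Int)) := [("a", [0, 2]), ("b", [1])]

def Spec_set_chars (char_map : List (String × List Int)) (out : List (List String)) : Prop := out = set_chars_alt char_map
instance (char_map : List (String × List Int)) (out : List (List String)) : Decidable (Spec_set_chars char_map out) := by unfold Spec_set_chars; infer_instance

-- ===== CLAIM (what is proved, stated in full; the proofs are below) =====
def Claim_equal_set_chars : Prop := ∀ (char_map : List (String × List Int)), Dom_set_chars char_map → Pre_set_chars char_map → Spec_set_chars char_map (set_chars char_map)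

-- ===== LEMMAS AND PROOFS =====

-- with nodup keys, first-match lookup of a member's key returns its own value
lemma pvLookup_self : ∀ (cm : List (String × List Int)),
    (cm.map Prod.fst).Nodup → ∀ e ∈ cm, pvLookup cm e.1 = e.2 := by
  intro cm
  induction cm with
  | nil => intro _ e he; simp at he
  | cons p ps ih =>
    intro hnd e he
    simp only [List.map_cons, List.nodup_cons] at hnd
    rw [List.mem_cons] at he
    rcases he with rfl | he
    · simp [pvLookup]
    · have hne : p.1 ≠ e.1 := by
        intro h; exact hnd.1 (h ▸ List.mem_map_of_mem he)
      have hb : (p.1 == e.1) = false := beq_eq_false_iff_ne.mpr hne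
      have : pvLookup (p :: ps) e.1 = pvLookup ps e.1 := by
        simp [pvLookup, List.find?, hb]
      rw [this]; exact ih hnd.2 e he

-- pvPickOne written as index selection with slicing
lemma pvPickOne_eq : ∀ (d : List String),
    pvPickOne d = (List.range d.length).map
      (fun j => (d.getD j "", d.take j ++ d.drop (j + 1))) := by
  intro d
  induction d with
  | nil => simp [pvPickOne]
  | cons x xs ih =>
    rw [List.length_cons, List.range_succ_eq_map, List.map_cons, List.map_map]
    simp only [pvPickOne, ih, List.map_map]
    refine List.cons_eq_cons.mpr ⟨by simp, ?_⟩
    apply List.map_congr_left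
    intro j _
    simp

-- a selection removes one element: every remainder in pvPickOne s is one shorter
lemma pvPickOne_len {α : Type} : ∀ (s : List α), ∀ p ∈ pvPickOne s, p.2.length + 1 = s.length := by
  intro s
  induction s with
  | nil => intro p hp; simp [pvPickOne] at hp
  | cons x xs ih =>
    intro p hp
    rw [pvPickOne, List.mem_cons] at hp
    rcases hp with rfl | hp
    · simp
    · rw [List.mem_map] at hp
      obtain ⟨q, hq, rfl⟩ := hp
      simp [← ih q hq]

-- asking for more elements than available yields no permutation
lemma pvPerms_nil_of_short {α : Type} : ∀ (r : Nat) (s : List α), s.length < r → pvPerms r s = [] := by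
  intro r
  induction r with
  | zero => intro s h; omega
  | succ r ih =>
    intro s h
    rw [pvPerms, List.flatMap_eq_nil_iff]
    intro p hp
    rw [ih p.2 (by have := pvPickOne_len s p hp; omega), List.map_nil]

-- core: the backtracking recursion equals mapping A's per-permutation fill
-- over all permutations, for any suffix of entries whose keys look up to themselves
lemma pvGoEq (cm : List (String × List Int)) :
    ∀ (es : List (String × List Int)) (digits arr : List String),
      (∀ e ∈ es, pvLookup cm e.1 = e.2) →
      set_chars_go es digits arr =
        (pvPerms es.length digits).map (fun P =>
          (List.zip P (es.map Prod.fst)).foldl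
            (fun a ck =>
              (pvLookup cm ck.2).foldl (fun a idx => PySem.List.pySetD a idx ck.1) a)
            arr) := by
  intro es
  induction es with
  | nil => intro digits arr _; simp [set_chars_go, pvPerms]
  | cons e es ih =>
    intro digits arr h
    have he : pvLookup cm e.1 = e.2 := h e (by simp)
    simp only [set_chars_go, List.length_cons, pvPerms, pvPickOne_eq,
      List.flatMap_map, List.map_flatMap]
    apply List.flatMap_congr
    intro j _
    rw [ih _ _ (fun x hx => h x (List.mem_cons_of_mem _ hx)), List.map_map]
    apply List.map_congr_left
    intro t _
    simp [List.zip_cons_cons, he]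

-- ===== VERDICT (by name: the statement is the Claim_ definition above) =====
theorem set_chars_spec : Claim_equal_set_chars := by
  intro cm _ hpre
  unfold Spec_set_chars set_chars set_chars_alt
  rw [PySem.List.foldl_append_singleton_eq_map]
  split_ifs with hlen
  · rw [pvPerms_nil_of_short cm.length pvNumStr hlen, List.map_nil, List.nil_append]
  · rw [pvGoEq cm cm pvNumStr (List.replicate 8 "") (pvLookup_self cm hpre.1)]
    simp
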